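-- pv_equiv track=rewrite | github.com/rf-iasys/OEIS | OEIS_A014125_Compare.py | A014125_exact
-- ===== SOURCE A (Python) =====
-- def A014125_exact(n_terms):
--     # Generate A001400 (partitions into at most 4 parts)
--     dp = [[0]*(2*n_terms+5) for _ in range(5)]
--     for k in range(1, 5):
--         dp[k][0] = 1
--         for n in range(1, 2*n_terms+1):
--             if n - k >= 0:
--                 dp[k][n] = dp[k-1][n] + dp[k][n-k]
--             else:
--                 dp[k][n] = dp[k-1][n]
--     a001400 = [dp[4][n] for n in range(1, 2*n_terms+1)]
--     # Bisection: take every other term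
--     return [a001400[2*i] for i in range(n_terms)]
-- ===== SOURCE B (Python) =====
-- def A014125_exact(n_terms):
--     # Closed form: the i-th term (partitions of 2i+1 into at most 4 parts)
--     # is the nearest-integer quasi-polynomial (i+2)^2 * (i+5) // 18.
--     return [(i + 2) ** 2 * (i + 5) // 18 for i in range(n_terms)]
-- ===== Notes on version B (the rewrite author's own statement) =====
-- stated objective: faster
-- what changed: Replaces A's 5x(2n+5) dynamic-programming table and intermediate a001400 list by the exact closed-form quasi-polynomial (i+2)^2*(i+5)//18 evaluated independently per term, with no table at all.
-- outside the precondition, e.g. on A014125_exact(-3): A raises IndexError, B returns []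
import Mathlib
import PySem

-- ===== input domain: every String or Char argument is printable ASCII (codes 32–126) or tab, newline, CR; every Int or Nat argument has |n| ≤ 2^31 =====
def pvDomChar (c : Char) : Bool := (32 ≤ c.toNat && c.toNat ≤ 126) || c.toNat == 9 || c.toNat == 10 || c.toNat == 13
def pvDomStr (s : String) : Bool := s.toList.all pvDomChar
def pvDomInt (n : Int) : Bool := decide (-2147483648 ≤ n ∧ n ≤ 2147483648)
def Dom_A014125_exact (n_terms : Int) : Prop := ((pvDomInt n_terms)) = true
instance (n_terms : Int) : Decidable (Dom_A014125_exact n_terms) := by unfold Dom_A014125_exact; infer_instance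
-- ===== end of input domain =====

-- B replaces A's 2D at-most-k-parts DP table and intermediate a001400 list by the exact
-- closed-form quasi-polynomial (i+2)^2*(i+5)//18 per term (objective: faster, constant factor).

-- ===== PORT A =====
-- inner loop body of A: dp[k][n] = dp[k-1][n] + dp[k][n-k] if n-k >= 0 else dp[k-1][n]
def pvAInner (k : Int) (dp : List (List Int)) (n : Int) : List (List Int) :=
  PySem.List.pySetD dp k (PySem.List.pySetD (PySem.List.pyGetD dp k []) n
    (if n - k ≥ 0 then
      PySem.List.pyGetD (PySem.List.pyGetD dp (k-1) []) n 0
        + PySem.List.pyGetD (PySem.List.pyGetD dp k []) (n-k) 0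
    else
      PySem.List.pyGetD (PySem.List.pyGetD dp (k-1) []) n 0))

-- body of A's outer loop over k: dp[k][0] = 1, then the inner loop over n
def pvARow (n_terms : Int) (dp : List (List Int)) (k : Int) : List (List Int) :=
  (PySem.List.pyRange 1 (2*n_terms+1) 1).foldl (pvAInner k)
    (PySem.List.pySetD dp k (PySem.List.pySetD (PySem.List.pyGetD dp k []) 0 1))

-- the finished table dp after both loops of A
def pvATable (n_terms : Int) : List (List Int) :=
  (PySem.List.pyRange 1 5 1).foldl (pvARow n_terms)
    ((PySem.List.pyRange 0 5 1).map (fun _ => PySem.List.pyRepeat [(0:Int)] (2*n_terms+5)))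

-- the intermediate list a001400 = [dp[4][n] for n in range(1, 2*n_terms+1)]
def pvA1400 (n_terms : Int) : List Int :=
  let dp := pvATable n_terms
  (PySem.List.pyRange 1 (2*n_terms+1) 1).map (fun n =>
    PySem.List.pyGetD (PySem.List.pyGetD dp 4 []) n 0)

def A014125_exact (n_terms : Int) : List Int :=
  let a001400 := pvA1400 n_terms
  (PySem.List.pyRange 0 n_terms 1).map (fun i => PySem.List.pyGetD a001400 (2*i) 0)

-- ===== PORT B =====
-- closed form: [(i + 2) ** 2 * (i + 5) // 18 for i in range(n_terms)]
def A014125_exact_alt (n_terms : Int) : List Int :=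
  (PySem.List.pyRange 0 n_terms 1).map (fun i => PySem.Int.floordiv ((i+2)^2*(i+5)) 18)

-- ===== PRECONDITION & SPEC =====
-- Pre_ excludes exactly n_terms ≤ -3, where Python A raises IndexError
-- (its rows [0]*(2*n_terms+5) are empty, yet it still assigns dp[k][0] = 1).
def Pre_A014125_exact (n_terms : Int) : Prop := -2 ≤ n_terms
instance (n_terms : Int) : Decidable (Pre_A014125_exact n_terms) := by unfold Pre_A014125_exact; infer_instance
def pvWitness_A014125_exact : Int := (3)

def Spec_A014125_exact (n_terms : Int) (out : List Int) : Prop := out = A014125_exact_alt n_terms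
instance (n_terms : Int) (out : List Int) : Decidable (Spec_A014125_exact n_terms out) := by unfold Spec_A014125_exact; infer_instance

-- ===== CLAIM (what is proved, stated in full; the proofs are below) =====
def Claim_equal_A014125_exact : Prop := ∀ (n_terms : Int), Dom_A014125_exact n_terms → Pre_A014125_exact n_terms → Spec_A014125_exact n_terms (A014125_exact n_terms)

-- ===== LEMMAS AND PROOFS =====

-- Qp c m = number of partitions of m into parts ≤ c (equivalently, into at most c parts);
-- A's table satisfies this recurrence, and B's closed form evaluates it.
def Qp : Nat → Nat → Int
  | 0, 0 => 1
  | 0, _+1 => 0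
  | _+1, 0 => 1
  | c+1, m+1 => Qp c (m+1) + (if c ≤ m then Qp (c+1) (m - c) else 0)
termination_by c m => (c, m)

lemma Qp_zero (c : Nat) : Qp c 0 = 1 := by cases c <;> simp [Qp]

lemma Qp_zero_pos (m : Nat) (h : 1 ≤ m) : Qp 0 m = 0 := by
  cases m with
  | zero => omega
  | succ m => simp [Qp]

lemma Qp_succ (c m : Nat) :
    Qp (c+1) (m+1) = Qp c (m+1) + (if c ≤ m then Qp (c+1) (m - c) else 0) := by
  simp [Qp]

lemma Qp_pred (c m : Nat) (h : m ≤ c) : Qp (c+1) m = Qp c m := by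
  cases m with
  | zero => rw [Qp_zero, Qp_zero]
  | succ m => rw [Qp_succ, if_neg (by omega), add_zero]

lemma Qp_step (k t : Nat) (hk : 1 ≤ k) (ht : 1 ≤ t) (h : k ≤ t) :
    Qp k t = Qp (k-1) t + Qp k (t-k) := by
  cases k with
  | zero => omega
  | succ c =>
    cases t with
    | zero => omega
    | succ m =>
      rw [Qp_succ, if_pos (by omega)]
      simp

-- state models ------------------------------------------------------------

-- A's row k while its inner loop has processed n = 1 .. t-1 (entry 0 already set to 1)
def rowM (N k t : Nat) : List Int :=
  (List.range (2*N+5)).map (fun j => if j = 0 then 1 else if j < t then Qp k j else 0)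

-- A's table after outer iterations 1 .. k are complete
def dpAF (N k : Nat) : List (List Int) :=
  (List.range 5).map (fun r => if 1 ≤ r ∧ r ≤ k then rowM N r (2*N+1) else List.replicate (2*N+5) 0)

-- A's table while row k is being filled, inner loop about to process n = t
def dpAS (N k t : Nat) : List (List Int) :=
  (List.range 5).map (fun r =>
    if 1 ≤ r ∧ r < k then rowM N r (2*N+1)
    else if r = k then rowM N k t
    else List.replicate (2*N+5) 0)

-- generic list helpers ----------------------------------------------------

lemma map_range_set {α : Type} (n k : Nat) (f : Nat → α) (v : α) (_hk : k < n) :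
    ((List.range n).map f).set k v = (List.range n).map (fun j => if j = k then v else f j) := by
  apply List.ext_getElem
  · simp
  · intro i h1 h2
    simp only [List.length_set, List.length_map, List.length_range] at h1
    rw [List.getElem_set]
    simp only [List.getElem_map, List.getElem_range]
    by_cases hik : k = i
    · subst hik; simp
    · rw [if_neg hik, if_neg (fun h => hik h.symm)]

lemma map_range_congr {α : Type} (n : Nat) (f g : Nat → α) (h : ∀ j, j < n → f j = g j) :
    (List.range n).map f = (List.range n).map g :=
  List.map_congr_left (fun a ha => h a (List.mem_range.mp ha))

-- A-side evaluation ------------------------------------------------------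

lemma A_init (N : Nat) :
    (PySem.List.pyRange 0 5 1).map (fun _ => PySem.List.pyRepeat [(0:Int)] (2*(N:Int)+5))
      = dpAF N 0 := by
  rw [show PySem.List.pyRange 0 5 1 = [0,1,2,3,4] by decide]
  simp only [List.map_cons, List.map_nil, PySem.List.pyRepeat_singleton,
    show ((2*(N:Int)+5)).toNat = 2*N+5 by omega]
  unfold dpAF
  rw [show List.range 5 = [0,1,2,3,4] by decide]
  simp only [List.map_cons, List.map_nil]
  norm_num

lemma A_innerstep (N k t : Nat) (hk1 : 1 ≤ k) (hk4 : k ≤ 4) (ht1 : 1 ≤ t) (ht : t < 2*N+1) :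
    pvAInner (k:Int) (dpAS N k t) (t:Int) = dpAS N k (t+1) := by
  have hprev : ∀ j, 1 ≤ j → j < 2*N+1 → ((dpAS N k t).getD (k-1) []).getD j 0 = Qp (k-1) j := by
    intro j hj1 hj2
    unfold dpAS
    rw [PySem.List.getD_map_range _ _ _ _ (show k-1 < 5 by omega)]
    by_cases hk2 : k = 1
    · subst hk2
      rw [if_neg (by omega), if_neg (by omega), List.getD_replicate _ (by omega),
          Qp_zero_pos j hj1]
    · rw [if_pos ⟨by omega, by omega⟩]
      unfold rowM
      rw [PySem.List.getD_map_range _ _ _ _ (show j < 2*N+5 by omega),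
          if_neg (by omega), if_pos (by omega)]
  have hself : ∀ j, j < t → (rowM N k t).getD j 0 = Qp k j := by
    intro j hj
    unfold rowM
    rw [PySem.List.getD_map_range _ _ _ _ (show j < 2*N+5 by omega)]
    by_cases hj0 : j = 0
    · subst hj0; rw [if_pos rfl]; exact (Qp_zero k).symm
    · rw [if_neg hj0, if_pos hj]
  have hrow : (rowM N k t).set t (Qp k t) = rowM N k (t+1) := by
    unfold rowM
    rw [map_range_set _ _ _ _ (show t < 2*N+5 by omega)]
    apply map_range_congr
    intro j hj
    by_cases hjt : j = t
    · subst hjt; rw [if_pos rfl, if_neg (by omega), if_pos (by omega)]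
    · rw [if_neg hjt]
      by_cases hj0 : j = 0
      · rw [if_pos hj0, if_pos hj0]
      · rw [if_neg hj0, if_neg hj0]
        by_cases hjlt : j < t
        · rw [if_pos hjlt, if_pos (by omega)]
        · rw [if_neg hjlt, if_neg (by omega)]
  have houter : (dpAS N k t).set k (rowM N k (t+1)) = dpAS N k (t+1) := by
    unfold dpAS
    rw [map_range_set _ _ _ _ (show k < 5 by omega)]
    apply map_range_congr
    intro r hr
    by_cases hrk : r = k
    · subst hrk; rw [if_pos rfl, if_neg (by omega), if_pos rfl]
    · simp only [if_neg hrk]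
  have hrowk : (dpAS N k t).getD k [] = rowM N k t := by
    unfold dpAS
    rw [PySem.List.getD_map_range _ _ _ _ (show k < 5 by omega),
        if_neg (by omega), if_pos rfl]
  unfold pvAInner
  rw [show ((k:Int) - 1) = ((k-1 : Nat) : Int) by omega]
  simp only [PySem.List.pySetD_natCast, PySem.List.pyGetD_natCast]
  rw [hrowk]
  by_cases hkt : k ≤ t
  · rw [if_pos (show (t:Int) - (k:Int) ≥ 0 by omega), hprev t ht1 ht,
        show ((t:Int)-(k:Int)) = ((t-k : Nat) : Int) by omega,
        PySem.List.pyGetD_natCast, hself (t-k) (by omega),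
        show Qp (k-1) t + Qp k (t-k) = Qp k t from (Qp_step k t hk1 ht1 hkt).symm,
        hrow]
    exact houter
  · rw [if_neg (show ¬ ((t:Int) - (k:Int) ≥ 0) by omega), hprev t ht1 ht]
    have hq := Qp_pred (k-1) t (by omega)
    rw [show k-1+1 = k by omega] at hq
    rw [hq] at hrow
    rw [hrow]
    exact houter

lemma A_inner (N k : Nat) (hk1 : 1 ≤ k) (hk4 : k ≤ 4) : ∀ (t : Nat), 1 ≤ t → t ≤ 2*N+1 →
    (PySem.List.pyRange (t:Int) (2*(N:Int)+1) 1).foldl (pvAInner (k:Int)) (dpAS N k t)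
      = dpAS N k (2*N+1) := by
  suffices h : ∀ (fuel t : Nat), 1 ≤ t → t ≤ 2*N+1 → 2*N+1 ≤ t + fuel →
      (PySem.List.pyRange (t:Int) (2*(N:Int)+1) 1).foldl (pvAInner (k:Int)) (dpAS N k t)
        = dpAS N k (2*N+1) by
    intro t ht hb; exact h (2*N+1) t ht hb (by omega)
  intro fuel
  induction fuel with
  | zero =>
    intro t ht1 ht2 hb
    rw [show t = 2*N+1 by omega, PySem.List.pyRange_one_eq_nil (by omega), List.foldl_nil]
  | succ fuel ih =>
    intro t ht1 ht2 hb
    by_cases hend : 2*N+1 ≤ t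
    · rw [show t = 2*N+1 by omega, PySem.List.pyRange_one_eq_nil (by omega), List.foldl_nil]
    · rw [PySem.List.pyRange_one_cons (by omega), List.foldl_cons,
          A_innerstep N k t hk1 hk4 ht1 (by omega),
          show ((t:Int)+1) = ((t+1 : Nat) : Int) by omega]
      exact ih (t+1) (by omega) (by omega) (by omega)

lemma A_row (N k : Nat) (hk1 : 1 ≤ k) (hk4 : k ≤ 4) :
    pvARow (N:Int) (dpAF N (k-1)) (k:Int) = dpAF N k := by
  unfold pvARow
  have hinit : PySem.List.pySetD (dpAF N (k-1)) (k:Int)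
      (PySem.List.pySetD (PySem.List.pyGetD (dpAF N (k-1)) (k:Int) []) 0 1) = dpAS N k 1 := by
    rw [show (0:Int) = ((0:Nat):Int) by norm_num]
    simp only [PySem.List.pySetD_natCast, PySem.List.pyGetD_natCast]
    have hget : (dpAF N (k-1)).getD k [] = List.replicate (2*N+5) 0 := by
      unfold dpAF
      rw [PySem.List.getD_map_range _ _ _ _ (show k < 5 by omega), if_neg (by omega)]
    rw [hget]
    have hrow1 : (List.replicate (2*N+5) (0:Int)).set 0 1 = rowM N k 1 := by
      apply List.ext_getElem
      · simp [rowM]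
      · intro i hi1 hi2
        simp only [List.getElem_set, List.getElem_replicate, rowM, List.getElem_map,
          List.getElem_range]
        by_cases h : i = 0
        · subst h; simp
        · rw [if_neg (fun hc => h hc.symm), if_neg h, if_neg (by omega)]
    rw [hrow1]
    unfold dpAF dpAS
    rw [map_range_set _ _ _ _ (show k < 5 by omega)]
    apply map_range_congr
    intro r hr
    by_cases hrk : r = k
    · subst hrk; rw [if_pos rfl, if_neg (by omega), if_pos rfl]
    · simp only [if_neg hrk]
      by_cases h1 : 1 ≤ r ∧ r ≤ k-1
      · rw [if_pos h1, if_pos ⟨by omega, by omega⟩]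
      · rw [if_neg h1, if_neg (by omega)]
  have ha := A_inner N k hk1 hk4 1 (by omega) (by omega)
  norm_num at ha
  rw [hinit, ha]
  unfold dpAS dpAF
  apply map_range_congr
  intro r hr
  by_cases hrk : r = k
  · subst hrk; rw [if_neg (by omega), if_pos rfl, if_pos ⟨hk1, le_rfl⟩]
  · by_cases h1 : 1 ≤ r ∧ r < k
    · rw [if_pos h1, if_pos ⟨h1.1, by omega⟩]
    · rw [if_neg h1, if_neg hrk, if_neg (by omega)]

lemma A_table (N : Nat) : pvATable (N:Int) = dpAF N 4 := by
  unfold pvATable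
  rw [A_init N, show PySem.List.pyRange 1 5 1 = [1,2,3,4] by decide]
  simp only [List.foldl_cons, List.foldl_nil]
  have r1 := A_row N 1 (by omega) (by omega)
  have r2 := A_row N 2 (by omega) (by omega)
  have r3 := A_row N 3 (by omega) (by omega)
  have r4 := A_row N 4 (by omega) (by omega)
  norm_num at r1 r2 r3 r4
  rw [r1, r2, r3, r4]

lemma A_eval (N : Nat) (hN : 1 ≤ N) :
    A014125_exact (N : Int) = (List.range N).map (fun i => Qp 4 (2*i+1)) := by
  unfold A014125_exact pvA1400
  show (PySem.List.pyRange 0 (N:Int) 1).map (fun i =>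
      PySem.List.pyGetD ((PySem.List.pyRange 1 (2*(N:Int)+1) 1).map (fun n =>
        PySem.List.pyGetD (PySem.List.pyGetD (pvATable (N:Int)) 4 []) n 0)) (2*i) 0)
    = (List.range N).map (fun i => Qp 4 (2*i+1))
  rw [A_table N, PySem.List.pyGetD_ofNat']
  have hrow4 : (dpAF N 4).getD 4 [] = rowM N 4 (2*N+1) := by
    unfold dpAF
    rw [PySem.List.getD_map_range _ _ _ _ (show 4 < 5 by omega), if_pos ⟨by omega, by omega⟩]
  rw [hrow4, PySem.List.pyRange_one 0 (N:Int),
      show ((N:Int) - 0).toNat = N by omega, List.map_map]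
  apply map_range_congr
  intro i hi
  simp only [Function.comp_apply]
  rw [show (2*(0 + (i:Int))) = ((2*i : Nat) : Int) by push_cast; ring,
      PySem.List.pyGetD_map_pyRange_one _ 1 (2*(N:Int)+1) (2*i) 0 (by omega),
      show ((1:Int) + ((2*i : Nat):Int)) = ((2*i+1 : Nat) : Int) by push_cast; ring,
      PySem.List.pyGetD_natCast]
  unfold rowM
  rw [PySem.List.getD_map_range _ _ _ _ (show 2*i+1 < 2*N+5 by omega),
      if_neg (by omega), if_pos (by omega)]

-- B-side: closed forms for Qp ---------------------------------------------

lemma Qp1_all (m : Nat) : Qp 1 m = 1 := by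
  induction m with
  | zero => exact Qp_zero 1
  | succ n ih =>
    rw [show Qp 1 (n+1) = Qp 0 (n+1) + (if 0 ≤ n then Qp 1 (n-0) else 0) from Qp_succ 0 n,
        Qp_zero_pos (n+1) (by omega), if_pos (Nat.zero_le n)]
    simpa using ih

lemma Qp2_all (m : Nat) : Qp 2 m = (m:Int)/2 + 1 := by
  induction m using Nat.strong_induction_on with
  | _ m ih =>
    rcases Nat.lt_or_ge m 2 with h | h
    · interval_cases m
      · rw [Qp_zero]; decide
      · rw [show Qp 2 1 = Qp 1 1 from Qp_pred 1 1 (by omega), Qp1_all]; decide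
    · obtain ⟨n, rfl⟩ : ∃ n, m = n+2 := ⟨m-2, by omega⟩
      rw [Qp_step 2 (n+2) (by omega) (by omega) (by omega),
          show n+2-2 = n from by omega, Qp1_all, ih n (by omega)]
      push_cast
      omega

lemma arith3 (q r : Int) (_hq : 0 ≤ q) (hr0 : 0 ≤ r) (hr6 : r < 6) :
    ((6*q+r+3)^2+6*(6*q+r+3)+15)/12 = (6*q+r+3)/2 + 1 + ((6*q+r)^2+6*(6*q+r)+15)/12 := by
  obtain ⟨a, ha⟩ : ∃ a, a = q*q := ⟨_, rfl⟩
  have e1 : (6*q+r+3)^2+6*(6*q+r+3)+15 = 36*a + (12*r+72)*q + ((r+3)^2+6*(r+3)+15) := by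
    rw [ha]; ring
  have e2 : (6*q+r)^2+6*(6*q+r)+15 = 36*a + (12*r+36)*q + (r*r+6*r+15) := by
    rw [ha]; ring
  rw [e1, e2]
  interval_cases r <;> omega

lemma Qp3_all (m : Nat) : Qp 3 m = ((m:Int)^2 + 6*(m:Int) + 15)/12 := by
  induction m using Nat.strong_induction_on with
  | _ m ih =>
    rcases Nat.lt_or_ge m 3 with h | h
    · interval_cases m
      · rw [Qp_zero]; decide
      · rw [show Qp 3 1 = Qp 2 1 from Qp_pred 2 1 (by omega), Qp2_all]; decide
      · rw [show Qp 3 2 = Qp 2 2 from Qp_pred 2 2 (by omega), Qp2_all]; decide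
    · obtain ⟨n, rfl⟩ : ∃ n, m = n+3 := ⟨m-3, by omega⟩
      rw [Qp_step 3 (n+3) (by omega) (by omega) (by omega),
          show n+3-3 = n from by omega, Qp2_all, ih n (by omega)]
      push_cast
      have hx : (0:Int) ≤ (n:Int) := Int.natCast_nonneg n
      obtain ⟨q, r, hq, hr0, hr6, hxe⟩ : ∃ q r, 0 ≤ q ∧ 0 ≤ r ∧ r < 6 ∧ (n:Int) = 6*q+r :=
        ⟨(n:Int)/6, (n:Int)%6, Int.ediv_nonneg hx (by norm_num),
         Int.emod_nonneg _ (by norm_num), Int.emod_lt_of_pos _ (by norm_num), by omega⟩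
      rw [hxe]
      exact (arith3 q r hq hr0 hr6).symm

lemma arith4 (q r : Int) (_hq : 0 ≤ q) (hr0 : 0 ≤ r) (hr6 : r < 6) :
    (6*q+r+4)^2*(6*q+r+7)/18
      = ((2*(6*q+r)+5)^2+6*(2*(6*q+r)+5)+15)/12 + (6*q+r+2)^2*(6*q+r+5)/18 := by
  obtain ⟨a, ha⟩ : ∃ a, a = q*q := ⟨_, rfl⟩
  obtain ⟨b, hb⟩ : ∃ b, b = q*q*q := ⟨_, rfl⟩
  have e1 : (6*q+r+4)^2*(6*q+r+7)
      = 216*b + (108*r+540)*a + (18*(r*r)+180*r+432)*q + (r+4)^2*(r+7) := by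
    rw [ha, hb]; ring
  have e2 : (6*q+r+2)^2*(6*q+r+5)
      = 216*b + (108*r+324)*a + (18*(r*r)+108*r+144)*q + (r+2)^2*(r+5) := by
    rw [ha, hb]; ring
  have e3 : (2*(6*q+r)+5)^2+6*(2*(6*q+r)+5)+15
      = 144*a + (48*r+192)*q + ((2*r+5)^2+6*(2*r+5)+15) := by
    rw [ha]; ring
  rw [e1, e2, e3]
  interval_cases r <;> omega

lemma Qp4_odd (i : Nat) : Qp 4 (2*i+1) = ((i:Int)+2)^2*((i:Int)+5)/18 := by
  induction i using Nat.strong_induction_on with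
  | _ i ih =>
    rcases Nat.lt_or_ge i 2 with h | h
    · interval_cases i
      · rw [show Qp 4 (2*0+1) = Qp 3 1 from Qp_pred 3 1 (by omega),
            show Qp 3 1 = Qp 2 1 from Qp_pred 2 1 (by omega), Qp2_all]
        decide
      · rw [show Qp 4 (2*1+1) = Qp 3 3 from Qp_pred 3 3 (by omega), Qp3_all]
        decide
    · obtain ⟨n, rfl⟩ : ∃ n, i = n+2 := ⟨i-2, by omega⟩
      rw [show 2*(n+2)+1 = 2*n+5 from by omega,
          Qp_step 4 (2*n+5) (by omega) (by omega) (by omega),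
          show 2*n+5-4 = 2*n+1 from by omega, Qp3_all, ih n (by omega)]
      push_cast
      have hx : (0:Int) ≤ (n:Int) := Int.natCast_nonneg n
      obtain ⟨q, r, hq, hr0, hr6, hxe⟩ : ∃ q r, 0 ≤ q ∧ 0 ≤ r ∧ r < 6 ∧ (n:Int) = 6*q+r :=
        ⟨(n:Int)/6, (n:Int)%6, Int.ediv_nonneg hx (by norm_num),
         Int.emod_nonneg _ (by norm_num), Int.emod_lt_of_pos _ (by norm_num), by omega⟩
      rw [show ((n:Int)+2+2) = (n:Int)+4 from by ring,
          show ((n:Int)+2+5) = (n:Int)+7 from by ring, hxe]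
      exact (arith4 q r hq hr0 hr6).symm

lemma B_eval (N : Nat) (hN : 1 ≤ N) :
    A014125_exact_alt (N : Int) = (List.range N).map (fun i => Qp 4 (2*i+1)) := by
  unfold A014125_exact_alt
  rw [PySem.List.pyRange_one 0 (N:Int),
      show ((N:Int) - 0).toNat = N by omega, List.map_map]
  apply map_range_congr
  intro i hi
  simp only [Function.comp_apply, zero_add]
  rw [Qp4_odd i, PySem.Int.floordiv_eq_ediv_of_pos (by norm_num)]

-- ===== VERDICT (by name: the statement is the Claim_ definition above) =====
theorem A014125_exact_spec : Claim_equal_A014125_exact := by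
  intro n hdom hpre
  unfold Spec_A014125_exact
  by_cases hn : n ≤ 0
  · simp [A014125_exact, A014125_exact_alt, PySem.List.pyRange_one_eq_nil hn]
  · have h1 : n = (n.toNat : Int) := by omega
    have h2 : 1 ≤ n.toNat := by omega
    rw [h1, A_eval _ h2, B_eval _ h2]
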